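-- pv_equiv track=rewrite | github.com/gh0stb0xr0cks/AGENT-RM | corpus/scripts/07_validate_corpus.py | check_split_leakage
-- ===== SOURCE A (Python) =====
-- def check_split_leakage(loaded: dict[str, list[dict]]) -> tuple[bool, list[str]]:
--     """Check 9 : aucun ID commun entre les splits."""
--     split_ids: dict[str, set[str]] = {
--         name: {r.get("id", "") for r in records}
--         for name, records in loaded.items()
--     }
--     errors: list[str] = []
--     names = list(split_ids)
--     for i in range(len(names)):
--         for j in range(i + 1, len(names)):
--             a, b = names[i], names[j]
--             common = split_ids[a] & split_ids[b]
--             if common: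
--                 sample = sorted(common)[:5]
--                 errors.append(
--                     f"Fuite {a}↔{b} : {len(common)} ID(s) en commun — "
--                     f"ex: {', '.join(sample)}"
--                 )
--     return len(errors) == 0, errors
-- ===== SOURCE B (Python) =====
-- def check_split_leakage(loaded: dict[str, list[dict]]) -> tuple[bool, list[str]]:
--     """Check 9 : aucun ID commun entre les splits (via un index inverse id -> splits)."""
--     owners: dict[str, set[str]] = {}
--     for name, records in loaded.items():
--         for r in records:
--             owners.setdefault(r.get("id", ""), set()).add(name)
--     errors: list[str] = []
--     rest = list(loaded)
--     while rest:
--         a, *rest = rest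
--         shared = [(i, s) for i, s in owners.items() if a in s]
--         for b in rest:
--             common = [i for i, s in shared if b in s]
--             if common:
--                 sample = sorted(common)[:5]
--                 errors.append(
--                     f"Fuite {a}↔{b} : {len(common)} ID(s) en commun — "
--                     f"ex: {', '.join(sample)}"
--                 )
--     return len(errors) == 0, errors
-- ===== Notes on version B (the rewrite author's own statement) =====
-- stated objective: alternative
-- what changed: B replaces A's per-split id-sets with pairwise set intersections by a single inverted index id->list-of-splits built in one pass over all records, from which each pair's common ids are read off; the pair loop walks suffixes of the name list instead of index arithmetic.
import Mathlib
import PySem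

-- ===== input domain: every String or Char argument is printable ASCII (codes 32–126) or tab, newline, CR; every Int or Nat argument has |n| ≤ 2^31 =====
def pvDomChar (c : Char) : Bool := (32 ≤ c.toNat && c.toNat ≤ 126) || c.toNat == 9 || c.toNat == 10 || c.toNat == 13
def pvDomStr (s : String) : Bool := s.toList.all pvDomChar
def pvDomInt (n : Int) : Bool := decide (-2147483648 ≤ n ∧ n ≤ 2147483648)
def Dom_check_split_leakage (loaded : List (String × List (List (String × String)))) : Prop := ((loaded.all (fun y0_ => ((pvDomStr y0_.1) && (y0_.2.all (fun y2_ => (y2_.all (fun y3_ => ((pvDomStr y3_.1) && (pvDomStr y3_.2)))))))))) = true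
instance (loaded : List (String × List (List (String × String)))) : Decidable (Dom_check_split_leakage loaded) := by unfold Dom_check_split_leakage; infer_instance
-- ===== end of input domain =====

-- B replaces A's per-split id-sets + pairwise set intersections by a single inverted index
-- id -> splits built in one pass over all records (objective: alternative; same asymptotic cost).

-- r.get("id", "")  (the record accessor both Pythons write verbatim)
def pvGetId (r : List (String × String)) : String := (PySem.Dict.mk r).getD "id" ""

-- the f-string both Pythons build verbatim from a, b and the common-id collection
def pvMsg (a b : String) (common : List String) : String :=
  let sample := PySem.List.slice (PySem.List.sorted common (fun x => x) false) none (some 5)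
  "Fuite " ++ a ++ "↔" ++ b ++ " : " ++ PySem.Int.toStr (common.length : Int) ++
    " ID(s) en commun — " ++ "ex: " ++ PySem.Str.join ", " sample

-- ===== PORT A =====
def check_split_leakage (loaded : List (String × List (List (String × String)))) : Bool × List String :=
  let split_ids : PySem.Dict String (List String) :=
    loaded.foldl (fun d p => d.insert p.1 (PySem.Set.ofList (p.2.map pvGetId))) PySem.Dict.empty
  let names := split_ids.keys
  let errors : List String :=
    (PySem.List.pyRange 0 (names.length : Int) 1).foldl (fun errors i =>
      (PySem.List.pyRange (i + 1) (names.length : Int) 1).foldl (fun errors j =>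
        let a := PySem.List.pyGetD names i ""
        let b := PySem.List.pyGetD names j ""
        let common := PySem.Set.inter (split_ids.getD a []) (split_ids.getD b [])
        if common ≠ [] then errors ++ [pvMsg a b common] else errors) errors) []
  (errors.length == 0, errors)

-- ===== PORT B =====
-- 'while rest: a, *rest = rest; for b in rest: …' — structural recursion on the name list
def pvPairLoop (owners : PySem.Dict String (List String)) (errors : List String) :
    List String → List String
  | [] => errors
  | a :: rest =>
      let shared := owners.items.filter (fun q => q.2.contains a)
      pvPairLoop owners
        (rest.foldl (fun errors b =>
          let common := (shared.filter (fun q => q.2.contains b)).map (·.1)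
          if common ≠ [] then errors ++ [pvMsg a b common] else errors) errors) rest

def check_split_leakage_alt (loaded : List (String × List (List (String × String)))) : Bool × List String :=
  let owners : PySem.Dict String (List String) :=
    loaded.foldl (fun d p =>
      p.2.foldl (fun d r => d.modify (pvGetId r) [] (fun s => PySem.Set.add s p.1)) d)
      PySem.Dict.empty
  let errors := pvPairLoop owners [] (loaded.map (·.1))
  (errors.length == 0, errors)

-- ===== PRECONDITION & SPEC =====
-- The association-list encoding of the dict argument admits duplicate split names, which no
-- Python dict can have; Pre_ restricts to genuine dict inputs (distinct keys).
def Pre_check_split_leakage (loaded : List (String × List (List (String × String)))) : Prop :=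
  (loaded.map Prod.fst).Nodup
instance (loaded : List (String × List (List (String × String)))) : Decidable (Pre_check_split_leakage loaded) := by unfold Pre_check_split_leakage; infer_instance

def pvWitness_check_split_leakage : (List (String × List (List (String × String)))) :=
  [("train", [[("id", "x")], [("id", "y")]]), ("test", [[("id", "x")]])]

def Spec_check_split_leakage (loaded : List (String × List (List (String × String)))) (out : Bool × List String) : Prop := out = check_split_leakage_alt loaded
instance (loaded : List (String × List (List (String × String)))) (out : Bool × List String) : Decidable (Spec_check_split_leakage loaded out) := by unfold Spec_check_split_leakage; infer_instance

-- ===== CLAIM (what is proved, stated in full; the proofs are below) =====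
def Claim_equal_check_split_leakage : Prop := ∀ (loaded : List (String × List (List (String × String)))), Dom_check_split_leakage loaded → Pre_check_split_leakage loaded → Spec_check_split_leakage loaded (check_split_leakage loaded)

-- ===== LEMMAS AND PROOFS =====

-- the flat (id, split-name) pair list B's nested index-building loop walks
def pvPairs (loaded : List (String × List (List (String × String)))) : List (String × String) :=
  loaded.flatMap (fun p => p.2.map (fun r => (pvGetId r, p.1)))

-- A's nested index loops, abstracted over the per-pair step
def pvPairFold (step : List String → String → String → List String)
    (errors : List String) : List String → List String
  | [] => errors
  | a :: rest => pvPairFold step (rest.foldl (fun e b => step e a b) errors) rest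

theorem pvAssoc_unique {α β : Type} (l : List (α × β)) (h : (l.map Prod.fst).Nodup)
    {a : α} {x y : β} (h1 : (a, x) ∈ l) (h2 : (a, y) ∈ l) : x = y := by
  induction l with
  | nil => cases h1
  | cons p t ih =>
    simp only [List.map_cons, List.nodup_cons] at h
    rcases List.mem_cons.1 h1 with rfl | h1' <;> rcases List.mem_cons.1 h2 with h2' | h2'
    · cases h2'; rfl
    · exact absurd (List.mem_map_of_mem (f := Prod.fst) h2') (by simpa using h.1)
    · cases h2'; exact absurd (List.mem_map_of_mem (f := Prod.fst) h1') (by simpa using h.1)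
    · exact ih h.2 h1' h2'


-- per-pair step of A's loop body (the closure over split_ids)
def pvStepA (split_ids : PySem.Dict String (List String)) (e : List String) (a b : String) :
    List String :=
  let common := PySem.Set.inter (split_ids.getD a []) (split_ids.getD b [])
  if common ≠ [] then e ++ [pvMsg a b common] else e

-- per-pair step of B's loop body (the closure over owners)
def pvStepB (owners : PySem.Dict String (List String)) (e : List String) (a b : String) :
    List String :=
  let common := (owners.items.filter (fun q => q.2.contains a && q.2.contains b)).map (·.1)
  if common ≠ [] then e ++ [pvMsg a b common] else e

-- A's dict of id-sets and B's inverted index, as standalone functions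
def pvSplitIds (loaded : List (String × List (List (String × String)))) :
    PySem.Dict String (List String) :=
  loaded.foldl (fun d p => d.insert p.1 (PySem.Set.ofList (p.2.map pvGetId))) PySem.Dict.empty

def pvOwners (loaded : List (String × List (List (String × String)))) :
    PySem.Dict String (List String) :=
  loaded.foldl (fun d p =>
    p.2.foldl (fun d r => d.modify (pvGetId r) [] (fun s => PySem.Set.add s p.1)) d)
    PySem.Dict.empty

theorem pvOwners_eq_flat (loaded : List (String × List (List (String × String)))) :
    pvOwners loaded =
      (pvPairs loaded).foldl (fun d q => d.modify q.1 [] (fun s => PySem.Set.add s q.2))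
        PySem.Dict.empty := by
  simp [pvOwners, pvPairs, List.foldl_flatMap, List.foldl_map]

theorem pvGetD_foldl_modify_add (l : List (String × String)) (c : String) :
    ∀ d : PySem.Dict String (List String),
      (l.foldl (fun d q => d.modify q.1 [] (fun s => PySem.Set.add s q.2)) d).getD c [] =
        PySem.Set.update (d.getD c []) ((l.filter (fun q => q.1 == c)).map (·.2)) := by
  induction l with
  | nil => intro d; rfl
  | cons q l ih =>
    intro d
    rw [List.foldl_cons, ih]
    by_cases hc : q.1 = c
    · subst hc
      rw [List.filter_cons_of_pos (by simp), List.map_cons,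
        PySem.Dict.getD_modify_self]
      rfl
    · rw [List.filter_cons_of_neg (by simpa using hc),
        PySem.Dict.getD_modify_of_ne]
      exact fun h => hc h.symm

theorem pvOwners_getD (loaded : List (String × List (List (String × String)))) (i : String) :
    (pvOwners loaded).getD i [] =
      PySem.Set.ofList (((pvPairs loaded).filter (fun q => q.1 == i)).map (·.2)) := by
  rw [pvOwners_eq_flat, pvGetD_foldl_modify_add]
  simp [PySem.Set.update_nil_left, PySem.Dict.getD_empty]

theorem pvOwners_keys_nodup (loaded : List (String × List (List (String × String)))) :
    (pvOwners loaded).keys.Nodup := by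
  rw [pvOwners_eq_flat]
  exact PySem.Dict.nodup_keys_foldl_modify_key _ Prod.fst _ _ _ PySem.Dict.nodup_keys_empty

theorem pvMem_owners_getD (loaded : List (String × List (List (String × String))))
    (hnd : (loaded.map Prod.fst).Nodup) {a : String} {ra : List (List (String × String))}
    (hpa : (a, ra) ∈ loaded) (i : String) :
    a ∈ (pvOwners loaded).getD i [] ↔ ∃ r ∈ ra, pvGetId r = i := by
  rw [pvOwners_getD]
  simp only [PySem.Set.mem_ofList, List.mem_map, List.mem_filter, pvPairs, List.mem_flatMap]
  constructor
  · rintro ⟨⟨qi, qa⟩, ⟨⟨p, hp, hq⟩, hqi⟩, rfl⟩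
    obtain ⟨r, hr, hrq⟩ := hq
    cases hrq
    have := pvAssoc_unique loaded hnd hpa hp
    subst this
    exact ⟨r, hr, by simpa using hqi⟩
  · rintro ⟨r, hr, rfl⟩
    exact ⟨(pvGetId r, a), ⟨⟨(a, ra), hpa, by simpa using ⟨r, hr, rfl⟩⟩, by simp⟩, rfl⟩

theorem pvSplitIds_keys (loaded : List (String × List (List (String × String))))
    (hnd : (loaded.map Prod.fst).Nodup) :
    (pvSplitIds loaded).keys = loaded.map Prod.fst := by
  have h := PySem.Dict.keys_foldl_insert_key loaded Prod.fst
    (fun _ p => PySem.Set.ofList (p.2.map pvGetId)) PySem.Dict.empty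
  simpa [pvSplitIds, PySem.Set.update_nil_left, PySem.Set.ofList_eq_self_of_nodup _ hnd] using h

theorem pvSplitIds_getD (loaded : List (String × List (List (String × String))))
    (hnd : (loaded.map Prod.fst).Nodup) {a : String} {ra : List (List (String × String))}
    (hpa : (a, ra) ∈ loaded) :
    (pvSplitIds loaded).getD a [] = PySem.Set.ofList (ra.map pvGetId) := by
  have hitems : (pvSplitIds loaded).items =
      PySem.Dict.empty.items ++ loaded.map (fun p => (p.1, PySem.Set.ofList (p.2.map pvGetId))) :=
    PySem.Dict.items_foldl_insert_fresh (k := Prod.fst)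
      (v := fun p => PySem.Set.ofList (p.2.map pvGetId)) (d := PySem.Dict.empty) (l := loaded)
      (by intro p _; simp [PySem.Dict.contains_empty]) hnd
  apply PySem.Dict.getD_of_mem_items
  · rw [hitems]
    exact List.mem_append_right _
      (List.mem_map_of_mem (f := fun p => (p.1, PySem.Set.ofList (p.2.map pvGetId))) hpa)
  · rw [pvSplitIds_keys loaded hnd]; exact hnd

theorem pvCommon_perm (loaded : List (String × List (List (String × String))))
    (hnd : (loaded.map Prod.fst).Nodup) {a b : String}
    {ra rb : List (List (String × String))} (hpa : (a, ra) ∈ loaded) (hpb : (b, rb) ∈ loaded) :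
    (((pvOwners loaded).items.filter (fun q => q.2.contains a && q.2.contains b)).map (·.1)).Perm
      (PySem.Set.inter (PySem.Set.ofList (ra.map pvGetId)) (PySem.Set.ofList (rb.map pvGetId))) := by
  have hndk : (pvOwners loaded).keys.Nodup := pvOwners_keys_nodup loaded
  apply (List.perm_ext_iff_of_nodup ?_ ?_).2
  · intro i
    simp only [List.mem_map, List.mem_filter, Bool.and_eq_true, List.contains_iff_mem,
      PySem.Set.mem_inter, PySem.Set.mem_ofList, List.mem_map]
    constructor
    · rintro ⟨⟨i', s⟩, ⟨hmem, ha, hb⟩, rfl⟩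
      have hget : (pvOwners loaded).getD i' [] = s :=
        PySem.Dict.getD_of_mem_items _ hmem hndk []
      rw [← hget] at ha hb
      exact ⟨by simpa using (pvMem_owners_getD loaded hnd hpa i').1 ha,
             by simpa using (pvMem_owners_getD loaded hnd hpb i').1 hb⟩
    · rintro ⟨⟨r1, hr1, hi1⟩, ⟨r2, hr2, hi2⟩⟩
      have ha : a ∈ (pvOwners loaded).getD i [] :=
        (pvMem_owners_getD loaded hnd hpa i).2 ⟨r1, hr1, hi1⟩
      have hsome : ∃ s, (pvOwners loaded).get? i = some s := by
        cases hget : (pvOwners loaded).get? i with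
        | none => rw [PySem.Dict.getD_eq_get?_getD, hget] at ha; cases ha
        | some s => exact ⟨s, rfl⟩
      obtain ⟨s, hs⟩ := hsome
      have hgd : (pvOwners loaded).getD i [] = s :=
        PySem.Dict.getD_of_get?_eq_some _ [] hs
      refine ⟨(i, s), ⟨PySem.Dict.mem_items_of_get?_eq_some _ hs, ?_, ?_⟩, rfl⟩
    -- a ∈ s and b ∈ s
      · rw [← hgd]; exact ha
      · rw [← hgd]; exact (pvMem_owners_getD loaded hnd hpb i).2 ⟨r2, hr2, hi2⟩
  · have hk := hndk
    simp only [PySem.Dict.keys] at hk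
    exact (List.Sublist.map (fun (x : String × List String) => x.1) List.filter_sublist).nodup hk
  · exact PySem.Set.nodup_inter _ _ (PySem.Set.nodup_ofList _)

theorem pvMsg_congr {a b : String} {c c' : List String} (h : c.Perm c') :
    pvMsg a b c = pvMsg a b c' := by
  unfold pvMsg
  rw [h.length_eq,
    PySem.List.sorted_eq_sorted_of_perm c c' (fun x => x) (fun _ _ h => h) h]

theorem pvStep_eq (loaded : List (String × List (List (String × String))))
    (hnd : (loaded.map Prod.fst).Nodup) {a b : String}
    (ha : a ∈ loaded.map Prod.fst) (hb : b ∈ loaded.map Prod.fst) (e : List String) :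
    pvStepA (pvSplitIds loaded) e a b = pvStepB (pvOwners loaded) e a b := by
  obtain ⟨⟨a', ra⟩, hpa, rfl⟩ := List.mem_map.1 ha
  obtain ⟨⟨b', rb⟩, hpb, rfl⟩ := List.mem_map.1 hb
  have hperm := pvCommon_perm loaded hnd hpa hpb
  simp only [pvStepA, pvStepB]
  rw [pvSplitIds_getD loaded hnd hpa, pvSplitIds_getD loaded hnd hpb]
  rcases eq_or_ne
      (PySem.Set.inter (PySem.Set.ofList (ra.map pvGetId)) (PySem.Set.ofList (rb.map pvGetId)))
      [] with hnil | hnil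
  · have hB : ((pvOwners loaded).items.filter
        (fun q => q.2.contains a' && q.2.contains b')).map (·.1) = [] := by
      rw [← List.length_eq_zero_iff, hperm.length_eq, hnil]; rfl
    rw [hnil, hB]
  · have hB : ((pvOwners loaded).items.filter
        (fun q => q.2.contains a' && q.2.contains b')).map (·.1) ≠ [] := by
      intro h; apply hnil
      rw [← List.length_eq_zero_iff, ← hperm.length_eq, h]; rfl
    rw [if_pos hnil, if_pos hB, pvMsg_congr hperm]

theorem pvPyRange_shift (a b : Int) :
    PySem.List.pyRange (a + 1) (b + 1) = (PySem.List.pyRange a b).map (· + 1) := by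
  simp only [PySem.List.pyRange_one, List.map_map]
  have h : b + 1 - (a + 1) = b - a := by ring
  rw [h]
  exact List.map_congr_left (fun k _ => by simp [Function.comp]; ring)

theorem pvGetD_cons_succ {α : Type} (x : α) (t : List α) {i : Int} (h : 0 ≤ i) (d : α) :
    PySem.List.pyGetD (x :: t) (i + 1) d = PySem.List.pyGetD t i d := by
  rw [PySem.List.pyGetD_of_nonneg _ _ (by omega), PySem.List.pyGetD_of_nonneg _ _ h]
  have h2 : (i + 1).toNat = i.toNat + 1 := by omega
  rw [h2, List.getD_cons_succ]

theorem pvPairFold_congr (s1 s2 : List String → String → String → List String)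
    (names : List String)
    (h : ∀ e a b, a ∈ names → b ∈ names → s1 e a b = s2 e a b) :
    ∀ e, pvPairFold s1 e names = pvPairFold s2 e names := by
  induction names with
  | nil => intro e; rfl
  | cons a t ih =>
    intro e
    simp only [pvPairFold]
    rw [PySem.List.foldl_congr_mem t _ _ e
      (fun acc b hb => h acc a b List.mem_cons_self (List.mem_cons_of_mem _ hb))]
    exact ih (fun e a' b' ha' hb' =>
      h e a' b' (List.mem_cons_of_mem _ ha') (List.mem_cons_of_mem _ hb')) _

theorem pvPairLoop_eq (owners : PySem.Dict String (List String)) (names : List String) :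
    ∀ e, pvPairLoop owners e names = pvPairFold (pvStepB owners) e names := by
  induction names with
  | nil => intro e; rfl
  | cons a t ih =>
    intro e
    simp only [pvPairLoop, pvPairFold, pvStepB, List.filter_filter]
    rw [PySem.List.foldl_congr_mem t _ _ e (fun acc b _ => by
      rw [List.filter_congr (fun q _ => by rw [Bool.and_comm])])]
    exact ih _

theorem pvLoopA_eq (step : List String → String → String → List String) (names : List String) :
    ∀ E : List String,
      (PySem.List.pyRange 0 (names.length : Int)).foldl (fun e i =>
        (PySem.List.pyRange (i + 1) (names.length : Int)).foldl (fun e j =>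
          step e (PySem.List.pyGetD names i "") (PySem.List.pyGetD names j "")) e) E
      = pvPairFold step E names := by
  induction names with
  | nil =>
    intro E
    rw [PySem.List.pyRange_one_eq_nil (by simp)]
    rfl
  | cons x t ih =>
    intro E
    have hlen : ((x :: t).length : Int) = (t.length : Int) + 1 := by
      push_cast [List.length_cons]; ring
    rw [hlen, PySem.List.pyRange_one_cons (show (0:Int) < (t.length : Int) + 1 by positivity),
      List.foldl_cons]
    -- the first (i = 0) iteration is the inner loop over the tail
    have h0 : (PySem.List.pyRange (0 + 1) ((t.length : Int) + 1)).foldl (fun e j =>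
        step e (PySem.List.pyGetD (x :: t) 0 "") (PySem.List.pyGetD (x :: t) j "")) E
        = t.foldl (fun e b => step e x b) E := by
      rw [zero_add, ← hlen]
      have := PySem.List.foldl_pyRange_pyGetD' (x :: t) ""
        (fun e b => step e (PySem.List.pyGetD (x :: t) 0 "") b) E (a := 1) (by omega)
      simpa [PySem.List.pyGetD_ofNat'] using this
    rw [h0]
    -- reindex the remaining outer iterations from 1..n to 0..n-1 over the tail
    rw [pvPyRange_shift 0 (t.length : Int), List.foldl_map]
    rw [PySem.List.foldl_congr_mem _ _
      (fun e i => (PySem.List.pyRange (i + 1) ((t.length : Int))).foldl (fun e j =>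
        step e (PySem.List.pyGetD t i "") (PySem.List.pyGetD t j "")) e) _ ?_]
    · exact ih _
    · intro acc i hi
      obtain ⟨hi0, hilt⟩ := PySem.List.mem_pyRange_one.1 hi
      have hr : PySem.List.pyRange (i + 1 + 1) ((t.length : Int) + 1)
          = (PySem.List.pyRange (i + 1) ((t.length : Int))).map (· + 1) :=
        pvPyRange_shift (i + 1) (t.length : Int)
      simp only [hr, List.foldl_map, pvGetD_cons_succ x t hi0]
      exact PySem.List.foldl_congr_mem _ _ _ acc (fun acc' j hj => by
        obtain ⟨hj0, _⟩ := PySem.List.mem_pyRange_one.1 hj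
        simp only [pvGetD_cons_succ x t (show (0:Int) ≤ j by omega)])

theorem check_split_leakage_spec : Claim_equal_check_split_leakage := by
  intro loaded _hdom hnd
  show check_split_leakage loaded = check_split_leakage_alt loaded
  have hA : check_split_leakage loaded =
      (((PySem.List.pyRange 0 (((pvSplitIds loaded).keys).length : Int)).foldl (fun e i =>
          (PySem.List.pyRange (i + 1) (((pvSplitIds loaded).keys).length : Int)).foldl (fun e j =>
            pvStepA (pvSplitIds loaded) e
              (PySem.List.pyGetD ((pvSplitIds loaded).keys) i "")
              (PySem.List.pyGetD ((pvSplitIds loaded).keys) j "")) e) []).length == 0,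
        (PySem.List.pyRange 0 (((pvSplitIds loaded).keys).length : Int)).foldl (fun e i =>
          (PySem.List.pyRange (i + 1) (((pvSplitIds loaded).keys).length : Int)).foldl (fun e j =>
            pvStepA (pvSplitIds loaded) e
              (PySem.List.pyGetD ((pvSplitIds loaded).keys) i "")
              (PySem.List.pyGetD ((pvSplitIds loaded).keys) j "")) e) []) := rfl
  have hB : check_split_leakage_alt loaded =
      ((pvPairLoop (pvOwners loaded) [] (loaded.map (·.1))).length == 0,
        pvPairLoop (pvOwners loaded) [] (loaded.map (·.1))) := rfl
  rw [hA, hB, pvLoopA_eq, pvPairLoop_eq, pvSplitIds_keys loaded hnd,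
    pvPairFold_congr (pvStepA (pvSplitIds loaded)) (pvStepB (pvOwners loaded))
      (loaded.map Prod.fst) (fun e a b ha hb => pvStep_eq loaded hnd ha hb e)]
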